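-- pv_equiv track=rewrite | github.com/matt-j-harvey/Widefield_Analysis | Behaviour_Analysis/Create_Behaviour_Matrix_Switching.py | split_stream_by_context
-- ===== SOURCE A (Python) =====
-- def split_stream_by_context(stimuli_onsets, context_onsets, context_window):
--     context_negative_onsets = []
--     context_positive_onsets = []
--
--     # Iterate Through Visual 1 Onsets
--     for stimuli_onset in stimuli_onsets:
--         context = False
--         window_start = stimuli_onset
--         window_end = stimuli_onset + context_window
--
--         for context_onset in context_onsets:
--             if context_onset >= window_start and context_onset <= window_end:
--                 context = True
--
--         if context == True:
--             context_positive_onsets.append(stimuli_onset)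
--         else:
--             context_negative_onsets.append(stimuli_onset)
--
--     return context_negative_onsets, context_positive_onsets
-- ===== SOURCE B (Python) =====
-- def _bisect_left(a, x):
--     # Hand-written bisect_left (no imports used by the original module).
--     lo = 0
--     hi = len(a)
--     while lo < hi:
--         mid = (lo + hi) // 2
--         if a[mid] < x:
--             lo = mid + 1
--         else:
--             hi = mid
--     return lo
--
--
-- def split_stream_by_context(stimuli_onsets, context_onsets, context_window):
--     cs = sorted(context_onsets)
--     n = len(cs)
--     context_negative_onsets = []
--     context_positive_onsets = []
--     for s in stimuli_onsets:
--         i = _bisect_left(cs, s)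
--         if i < n and cs[i] <= s + context_window:
--             context_positive_onsets.append(s)
--         else:
--             context_negative_onsets.append(s)
--     return context_negative_onsets, context_positive_onsets
-- ===== Notes on version B (the rewrite author's own statement) =====
-- stated objective: faster
-- what changed: B sorts context_onsets once and does a hand-written binary search (bisect_left) per stimulus onset instead of A's full inner scan of context_onsets for every stimulus.
import Mathlib
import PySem

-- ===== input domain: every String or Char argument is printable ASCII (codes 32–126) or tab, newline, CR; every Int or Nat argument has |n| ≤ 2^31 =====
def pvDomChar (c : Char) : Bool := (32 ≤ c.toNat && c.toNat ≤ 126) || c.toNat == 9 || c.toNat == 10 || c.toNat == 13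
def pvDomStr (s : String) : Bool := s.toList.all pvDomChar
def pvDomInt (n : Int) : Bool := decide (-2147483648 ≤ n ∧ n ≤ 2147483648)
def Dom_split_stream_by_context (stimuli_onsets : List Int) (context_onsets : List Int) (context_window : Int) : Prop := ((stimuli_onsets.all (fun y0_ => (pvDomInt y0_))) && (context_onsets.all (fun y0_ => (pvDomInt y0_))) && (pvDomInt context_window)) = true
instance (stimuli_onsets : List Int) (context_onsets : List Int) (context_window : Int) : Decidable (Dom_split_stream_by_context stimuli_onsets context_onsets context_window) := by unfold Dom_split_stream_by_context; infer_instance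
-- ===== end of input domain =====

-- B replaces A's inner linear scan over context_onsets by one sort of context_onsets plus a
-- binary search per stimulus (objective: faster, O((n+m) log m) instead of O(n·m)).

-- ===== PORT A =====
-- Literal port of A: for each stimulus, a full inner scan of context_onsets sets a flag.
def split_stream_by_context (stimuli_onsets : List Int) (context_onsets : List Int) (context_window : Int) : List Int × List Int :=
  stimuli_onsets.foldl (fun acc stimuli_onset =>
    let window_start := stimuli_onset
    let window_end := stimuli_onset + context_window
    let context := context_onsets.foldl (fun ctx context_onset =>
      if context_onset ≥ window_start ∧ context_onset ≤ window_end then true else ctx) false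
    if context = true then (acc.1, acc.2 ++ [stimuli_onset])
    else (acc.1 ++ [stimuli_onset], acc.2)) ([], [])

-- ===== PORT B =====
-- Hand-written binary search from Source B, step for step; a[mid] is always in range
-- (lo < hi ≤ a.length), so getD is exact; (lo+hi)//2 on nonnegative ints = Nat division.
def pvBisectLeft (a : List Int) (x : Int) (lo hi : Nat) : Nat :=
  if _h : lo < hi then
    let mid := (lo + hi) / 2
    if a.getD mid 0 < x then pvBisectLeft a x (mid + 1) hi
    else pvBisectLeft a x lo mid
  else lo
termination_by hi - lo
decreasing_by all_goals omega

def split_stream_by_context_alt (stimuli_onsets : List Int) (context_onsets : List Int) (context_window : Int) : List Int × List Int :=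
  let cs := PySem.List.sorted context_onsets (fun x => x) false
  let n := cs.length
  stimuli_onsets.foldl (fun acc s =>
    let i := pvBisectLeft cs s 0 n
    if i < n ∧ cs.getD i 0 ≤ s + context_window then (acc.1, acc.2 ++ [s])
    else (acc.1 ++ [s], acc.2)) ([], [])

-- ===== PRECONDITION & SPEC =====
def Spec_split_stream_by_context (stimuli_onsets : List Int) (context_onsets : List Int) (context_window : Int) (out : List Int × List Int) : Prop := out = split_stream_by_context_alt stimuli_onsets context_onsets context_window
instance (stimuli_onsets : List Int) (context_onsets : List Int) (context_window : Int) (out : List Int × List Int) : Decidable (Spec_split_stream_by_context stimuli_onsets context_onsets context_window out) := by unfold Spec_split_stream_by_context; infer_instance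

-- ===== CLAIM (what is proved, stated in full; the proofs are below) =====
def Claim_equal_split_stream_by_context : Prop := ∀ (stimuli_onsets : List Int) (context_onsets : List Int) (context_window : Int), Dom_split_stream_by_context stimuli_onsets context_onsets context_window → Spec_split_stream_by_context stimuli_onsets context_onsets context_window (split_stream_by_context stimuli_onsets context_onsets context_window)

-- ===== LEMMAS AND PROOFS =====

-- A's inner flag-setting scan computes `any`.
theorem innerA_eq_any (cs : List Int) (ws we : Int) (b : Bool) :
    cs.foldl (fun ctx c => if c ≥ ws ∧ c ≤ we then true else ctx) b
      = (b || cs.any (fun c => decide (ws ≤ c ∧ c ≤ we))) := by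
  induction cs generalizing b with
  | nil => simp
  | cons c t ih =>
    rw [List.foldl_cons, ih, List.any_cons]
    by_cases h : c ≥ ws ∧ c ≤ we
    · have hd : decide (ws ≤ c ∧ c ≤ we) = true := by rw [ge_iff_le] at h; simpa using h
      rw [if_pos h, hd]; cases b <;> simp
    · have hd : decide (ws ≤ c ∧ c ≤ we) = false := by rw [ge_iff_le] at h; simpa using h
      rw [if_neg h, hd]; cases b <;> simp

-- Binary-search invariant: everything left of the result (within [lo,hi)) is < x,
-- everything from the result on is ≥ x.
theorem pvBisectLeft_spec (a : List Int) (x : Int) (lo hi : Nat)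
    (hmono : ∀ p q : Nat, p ≤ q → q < a.length → a.getD p 0 ≤ a.getD q 0) :
    hi ≤ a.length → lo ≤ hi →
    lo ≤ pvBisectLeft a x lo hi ∧ pvBisectLeft a x lo hi ≤ hi ∧
    (∀ j, lo ≤ j → j < pvBisectLeft a x lo hi → a.getD j 0 < x) ∧
    (∀ j, pvBisectLeft a x lo hi ≤ j → j < hi → x ≤ a.getD j 0) := by
  induction lo, hi using pvBisectLeft.induct a x with
  | case1 lo hi h mid hlt ih =>
    intro hhi hlo
    rw [pvBisectLeft, dif_pos h]
    simp only [show ((lo + hi) / 2 = mid) from rfl] at *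
    rw [if_pos hlt]
    have hmid : mid < hi := by omega
    obtain ⟨i1, i2, i3, i4⟩ := ih hhi (by omega)
    refine ⟨by omega, i2, ?_, i4⟩
    intro j hj1 hj2
    by_cases hc : mid + 1 ≤ j
    · exact i3 j hc hj2
    · exact lt_of_le_of_lt (hmono j mid (by omega) (by omega)) hlt
  | case2 lo hi h mid hge ih =>
    intro hhi hlo
    rw [pvBisectLeft, dif_pos h]
    simp only [show ((lo + hi) / 2 = mid) from rfl] at *
    rw [if_neg hge]
    have hmid : mid < hi := by omega
    obtain ⟨i1, i2, i3, i4⟩ := ih (by omega) (by omega)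
    refine ⟨i1, by omega, i3, ?_⟩
    intro j hj1 hj2
    by_cases hc : j < mid
    · exact i4 j hj1 hc
    · exact le_trans (not_lt.mp hge) (hmono mid j (by omega) (by omega))
  | case3 lo hi h =>
    intro hhi hlo
    rw [pvBisectLeft, dif_neg h]
    exact ⟨le_refl _, by omega, by omega, by omega⟩

-- B's test "first element ≥ s exists and is ≤ s+w" decides the very same predicate.
theorem cond_iff (cs : List Int) (s w : Int) :
    (let a := PySem.List.sorted cs (fun x => x) false
     pvBisectLeft a s 0 a.length < a.length ∧
       a.getD (pvBisectLeft a s 0 a.length) 0 ≤ s + w)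
      ↔ ∃ c ∈ cs, s ≤ c ∧ c ≤ s + w := by
  set a := PySem.List.sorted cs (fun x => x) false with ha
  have hmono : ∀ p q : Nat, p ≤ q → q < a.length → a.getD p 0 ≤ a.getD q 0 := by
    intro p q hpq hq
    rw [List.getD_eq_getElem a 0 (by omega), List.getD_eq_getElem a 0 hq]
    exact PySem.List.sorted_id_getElem_mono cs hpq hq
  obtain ⟨i1, i2, i3, i4⟩ := pvBisectLeft_spec a s 0 a.length hmono (le_refl _) (by omega)
  set i := pvBisectLeft a s 0 a.length with hi
  constructor
  · rintro ⟨hlt, hle⟩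
    refine ⟨a.getD i 0, ?_, i4 i (le_refl _) hlt, hle⟩
    rw [← PySem.List.mem_sorted cs (fun x => x) false, ← ha]
    rw [List.getD_eq_getElem a 0 hlt]
    exact List.getElem_mem hlt
  · rintro ⟨c, hc, hsc, hcw⟩
    rw [← PySem.List.mem_sorted cs (fun x => x) false, ← ha] at hc
    obtain ⟨j, hj, hcj⟩ := List.mem_iff_getElem.mp hc
    have hgj : a.getD j 0 = c := by rw [List.getD_eq_getElem a 0 hj, hcj]
    have hij : i ≤ j := by
      by_contra hlt
      exact absurd hsc (not_le.mpr (hgj ▸ i3 j (by omega) (by omega)))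
    exact ⟨by omega, le_trans (hmono i j hij hj) (hgj ▸ hcw)⟩

-- ===== VERDICT (by name: the statement is the Claim_ definition above) =====
theorem split_stream_by_context_spec : Claim_equal_split_stream_by_context := by
  intro ss cs w _
  show split_stream_by_context ss cs w = split_stream_by_context_alt ss cs w
  unfold split_stream_by_context split_stream_by_context_alt
  congr 1
  funext acc s
  simp only [innerA_eq_any, Bool.false_or]
  have h1 : (cs.any (fun c => decide (s ≤ c ∧ c ≤ s + w)) = true)
      ↔ ∃ c ∈ cs, s ≤ c ∧ c ≤ s + w := by simp
  have h2 := cond_iff cs s w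
  simp only at h2
  by_cases h : ∃ c ∈ cs, s ≤ c ∧ c ≤ s + w
  · rw [if_pos (by simpa [h1] using h), if_pos (h2.mpr h)]
  · rw [if_neg (by simpa [h1] using h), if_neg (fun hc => h (h2.mp hc))]
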